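-- pv_equiv track=rewrite | github.com/Perdikis10/bookbot | stats.py | num_characters
-- ===== SOURCE A (Python) =====
-- def num_characters(text):
--     lowercase_text = text.lower()
--     num_chars = {}
--     for char in lowercase_text:
--         if char.isalpha():
--             if char in num_chars:
--                 num_chars[char] += 1
--             else:
--                 num_chars[char] = 1
--     return num_chars
-- ===== SOURCE B (Python) =====
-- def num_characters(text):
--     letters = [c for c in text.lower() if c.isalpha()]
--
--     def consume(chars):
--         if not chars:
--             return {}
--         c = chars[0]
--         rest = [x for x in chars if x != c]
--         return {c: len(chars) - len(rest), **consume(rest)}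
--
--     return consume(letters)
-- ===== Notes on version B (the rewrite author's own statement) =====
-- stated objective: alternative
-- what changed: Replaces A's single-pass incremental dict accumulation with a partition-and-recurse algorithm: filter the alphabetic letters once, then repeatedly take the first remaining letter, remove all its occurrences by partitioning the list, record the count as the length drop, and recurse on the remainder.
import Mathlib
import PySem

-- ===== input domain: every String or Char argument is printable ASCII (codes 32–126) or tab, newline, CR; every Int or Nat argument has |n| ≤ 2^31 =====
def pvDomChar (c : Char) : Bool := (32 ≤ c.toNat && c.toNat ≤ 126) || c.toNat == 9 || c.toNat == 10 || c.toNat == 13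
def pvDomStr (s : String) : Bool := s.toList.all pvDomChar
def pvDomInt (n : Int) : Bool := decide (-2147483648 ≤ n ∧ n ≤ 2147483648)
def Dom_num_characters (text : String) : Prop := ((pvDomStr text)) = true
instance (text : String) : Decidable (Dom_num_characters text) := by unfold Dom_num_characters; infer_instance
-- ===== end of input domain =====

-- B replaces A's single-pass dict accumulation with a partition-and-recurse algorithm
-- (take the first remaining letter, delete all its occurrences, count = length drop, recurse);
-- alternative decomposition, same results.

-- ===== PORT A =====
def num_characters (text : String) : List (String × Int) :=
  let lowercase_text := PySem.Str.lower text
  let num_chars : PySem.Dict String Int :=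
    lowercase_text.toList.foldl (fun d c =>
      if PySem.Chars.isalpha c then
        let k := String.singleton c
        if d.contains k then d.insert k (d.getD k 0 + 1) else d.insert k 1
      else d) PySem.Dict.empty
  num_chars.items

-- ===== PORT B =====
-- helper 'consume': merging '{c: v, **consume(rest)}' is a cons, since rest contains no c.
def pvConsume : List Char → List (String × Int)
  | [] => []
  | c :: t =>
    let rest := (c :: t).filter (fun x => x ≠ c)
    (String.singleton c, ((c :: t).length : Int) - (rest.length : Int)) :: pvConsume rest
termination_by l => l.length
decreasing_by
  simp only [List.filter_cons, decide_not, ne_eq, not_true_eq_false, decide_false,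
    Bool.not_false, Bool.false_eq_true, if_false, List.length_cons]
  exact Nat.lt_succ_of_le (List.length_filter_le _ _)

def num_characters_alt (text : String) : List (String × Int) :=
  let letters := (PySem.Chars.lower text.toList).filter PySem.Chars.isalpha
  pvConsume letters

-- ===== PRECONDITION & SPEC =====
def Spec_num_characters (text : String) (out : List (String × Int)) : Prop := out = num_characters_alt text
instance (text : String) (out : List (String × Int)) : Decidable (Spec_num_characters text out) := by unfold Spec_num_characters; infer_instance

-- ===== CLAIM (what is proved, stated in full; the proofs are below) =====
def Claim_equal_num_characters : Prop := ∀ (text : String), Dom_num_characters text → Spec_num_characters text (num_characters text)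

-- ===== LEMMAS AND PROOFS =====

lemma singleton_injective : Function.Injective String.singleton := by
  intro a b h
  simpa using congrArg String.toList h

lemma ofList_map_singleton (l : List Char) :
    PySem.Set.ofList (l.map String.singleton) = (PySem.Set.ofList l).map String.singleton := by
  induction l with
  | nil => rfl
  | cons x xs ih =>
    simp only [List.map_cons, PySem.Set.ofList_cons, ih]
    congr 1
    simp only [PySem.Set.discard, List.filter_map]
    congr 1
    apply List.filter_congr
    intro y _
    simp [Function.comp, singleton_injective.eq_iff]

-- A computes Counter(letters) of the filtered lowered text.
lemma a_eq_counts (text : String) :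
    num_characters text =
      (PySem.Set.ofList ((PySem.Chars.lower text.toList).filter PySem.Chars.isalpha)).map
        (fun c => (String.singleton c, (((PySem.Chars.lower text.toList).filter PySem.Chars.isalpha).count c : Int))) := by
  unfold num_characters
  simp only [PySem.Str.toList_lower]
  have hstep : (fun (d : PySem.Dict String Int) (c : Char) =>
      if PySem.Chars.isalpha c then
        let k := String.singleton c
        if d.contains k then d.insert k (d.getD k 0 + 1) else d.insert k 1
      else d)
      = fun d c => if PySem.Chars.isalpha c then
          d.insert (String.singleton c) (d.getD (String.singleton c) 0 + 1) else d := by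
    funext d c
    by_cases h : PySem.Chars.isalpha c
    · simp only [h, if_true]
      by_cases hc : d.contains (String.singleton c)
      · simp [hc]
      · simp [hc, PySem.Dict.getD_of_not_contains d (0 : Int) (by simpa using hc)]
    · simp [h]
  rw [hstep, ← List.foldl_filter, ← List.foldl_map (f := String.singleton)
      (g := fun (d : PySem.Dict String Int) k => d.insert k (d.getD k 0 + 1)),
    PySem.Dict.foldl_insert_getD_add_one_eq_counter, PySem.Dict.items_counter,
    ofList_map_singleton, List.map_map]
  apply List.map_congr_left
  intro c hc
  simp [List.count_map_of_injective _ _ singleton_injective]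

lemma ofList_filter (p : Char → Bool) (l : List Char) :
    PySem.Set.ofList (l.filter p) = (PySem.Set.ofList l).filter p := by
  induction l with
  | nil => rfl
  | cons x xs ih =>
    by_cases hx : p x
    · simp only [List.filter_cons, hx, if_true, PySem.Set.ofList_cons, ih, PySem.Set.discard,
        List.filter_filter]
      congr 1
      apply List.filter_congr
      intro y _
      rw [Bool.and_comm]
    · simp only [List.filter_cons, hx, Bool.false_eq_true, if_false, PySem.Set.ofList_cons, ih,
        PySem.Set.discard, List.filter_filter]
      apply List.filter_congr
      intro y _
      by_cases hy : y = x
      · subst hy; simp [hx]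
      · simp [hy]

lemma ofList_filter_ne (t : List Char) (c : Char) :
    PySem.Set.ofList (t.filter (fun x => x ≠ c)) = PySem.Set.discard (PySem.Set.ofList t) c := by
  rw [ofList_filter, PySem.Set.discard]
  apply List.filter_congr
  intro y _
  simp [Bool.beq_eq_decide_eq]

lemma count_filter_ne (t : List Char) (c c' : Char) (h : c' ≠ c) :
    (t.filter (fun x => x ≠ c)).count c' = t.count c' := by
  rw [List.count_filter]
  simp [h]

lemma length_filter_add_count (t : List Char) (c : Char) :
    (t.filter (fun x => x ≠ c)).length + t.count c = t.length := by
  induction t with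
  | nil => rfl
  | cons x xs ih =>
    by_cases hx : x = c
    · subst hx
      simp only [List.filter_cons, List.count_cons_self, List.length_cons, ne_eq,
        not_true_eq_false, decide_false, Bool.false_eq_true, if_false]
      simp only [ne_eq] at ih
      omega
    · simp only [List.filter_cons, ne_eq, hx, not_false_eq_true, decide_true, if_true,
        List.length_cons]
      rw [List.count_cons_of_ne (show x ≠ c from hx)]
      simp only [ne_eq] at ih
      omega

lemma consume_eq_counts (l : List Char) :
    pvConsume l = (PySem.Set.ofList l).map (fun c => (String.singleton c, (l.count c : Int))) := by
  induction l using pvConsume.induct with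
  | case1 => simp [pvConsume]
  | case2 c t rest ih =>
    rw [pvConsume]
    have hrest : rest = t.filter (fun x => x ≠ c) := by
      show (c :: t).filter _ = _
      simp
    rw [PySem.Set.ofList_cons, List.map_cons]
    congr 1
    · -- head: the count of c
      have h := length_filter_add_count t c
      simp only [List.length_cons, List.count_cons_self, List.filter_cons, ne_eq,
        not_true_eq_false, decide_false, Bool.false_eq_true, if_false]
      simp only [ne_eq] at h
      push_cast
      congr 1
      omega
    · -- tail
      rw [ih, hrest, ofList_filter_ne]
      apply List.map_congr_left
      intro c' hc'
      have hne : c' ≠ c := ((PySem.Set.mem_discard (PySem.Set.ofList t) c c').mp hc').2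
      rw [count_filter_ne t c c' hne, List.count_cons_of_ne (Ne.symm hne)]

-- ===== VERDICT (by name: the statement is the Claim_ definition above) =====
theorem num_characters_spec : Claim_equal_num_characters := by
  intro text _
  show num_characters text = num_characters_alt text
  rw [a_eq_counts]
  unfold num_characters_alt
  rw [consume_eq_counts]
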